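-- pv_equiv track=rewrite | github.com/hobit22/prac-coding-test | 프로그래머스/2/42587. 프로세스/프로세스.py | solution
-- ===== SOURCE A (Python) =====
-- from collections import deque
--
-- def solution(priorities, location):
--     answer = 0
--
--     queue = deque()
--
--     for i in range(len(priorities)):
--         queue.append((i, priorities[i]))
--
--     while queue:
--         now_idx, now_priority = queue.popleft()
--
--         if exist_max_priority(now_priority, queue):
--             queue.append((now_idx, now_priority))
--         else:
--             answer +=1
--             if now_idx == location:
--                 break
--
--
--
--
--     return answer
--
-- def exist_max_priority(priority, queue):
--     for q in queue:
--         if q[1] > priority: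
--             return True
--     return False
-- ===== SOURCE B (Python) =====
-- def solution(priorities, location):
--     buckets = {}
--     for i, p in enumerate(priorities):
--         buckets.setdefault(p, []).append(i)
--     answer = 0
--     c = 0
--     for p in sorted(buckets, reverse=True):
--         idxs = buckets[p]
--         k = 0
--         while k < len(idxs) and idxs[k] < c:
--             k += 1
--         order = idxs[k:] + idxs[:k]
--         for i in order:
--             answer += 1
--             if i == location:
--                 return answer
--         c = order[-1] + 1
--     return answer
-- ===== Notes on version B (the rewrite author's own statement) =====
-- stated objective: faster
-- what changed: Replaces the O(n^2) queue simulation by bucketing indices per priority and walking the distinct priorities in decreasing order with a cursor, so each process is touched O(1) times after an O(n log n) sort.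
import Mathlib
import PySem

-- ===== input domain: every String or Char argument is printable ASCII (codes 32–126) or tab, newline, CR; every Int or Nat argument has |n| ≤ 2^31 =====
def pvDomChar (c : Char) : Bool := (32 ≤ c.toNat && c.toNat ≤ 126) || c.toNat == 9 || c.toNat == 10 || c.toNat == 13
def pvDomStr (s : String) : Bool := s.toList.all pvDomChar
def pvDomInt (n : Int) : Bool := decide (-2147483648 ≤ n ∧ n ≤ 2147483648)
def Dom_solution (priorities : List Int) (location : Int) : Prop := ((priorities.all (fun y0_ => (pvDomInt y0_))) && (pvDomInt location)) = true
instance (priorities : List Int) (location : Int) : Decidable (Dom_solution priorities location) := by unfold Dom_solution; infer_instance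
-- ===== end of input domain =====

-- B drops A's O(n^2) rotating-queue simulation: it buckets the indices of each priority once,
-- then walks the distinct priorities in decreasing order with a wrap-around cursor (faster).
-- A's loop port carries a fuel guard (n*n+n+1 steps, never exhausted on a real run) solely to be total.

-- ===== PORT A =====
def existMaxPriority (priority : Int) (queue : List (Int × Int)) : Bool :=
  queue.any (fun q => q.2 > priority)

def solLoopA (fuel : Nat) (queue : List (Int × Int)) (answer : Int) (location : Int) : Int :=
  match fuel, queue with
  | 0, _ => answer
  | _ + 1, [] => answer
  | f + 1, (i, p) :: rest =>
    if existMaxPriority p rest then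
      solLoopA f (rest ++ [(i, p)]) answer location
    else if i = location then answer + 1
    else solLoopA f rest (answer + 1) location

def solution (priorities : List Int) (location : Int) : Int :=
  let n := priorities.length
  solLoopA (n * n + n + 1) (PySem.List.enumerate priorities) 0 location

-- ===== PORT B =====
-- buckets.setdefault(p, []).append(i) over enumerate(priorities)
def bBuild (pairs : List (Int × Int)) : PySem.Dict Int (List Int) :=
  pairs.foldl (fun d ip => d.modify ip.2 [] (fun v => v ++ [ip.1])) PySem.Dict.empty

-- while k < len(idxs) and idxs[k] < c: k += 1
def bSkip (idxs : List Int) (c : Int) : Nat :=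
  match idxs with
  | [] => 0
  | x :: xs => if x < c then bSkip xs c + 1 else 0

-- the inner 'for i in order' with its early return
def bScan (order : List Int) (answer : Int) (location : Int) : Except Int Int :=
  match order with
  | [] => .ok answer
  | i :: rest => if i = location then .error (answer + 1) else bScan rest (answer + 1) location

def bLoop (buckets : PySem.Dict Int (List Int)) (levels : List Int) (answer c location : Int) : Int :=
  match levels with
  | [] => answer
  | p :: ls =>
    let idxs := buckets.getD p []
    let k := bSkip idxs c
    let order := idxs.drop k ++ idxs.take k
    match bScan order answer location with
    | .error r => r
    | .ok a' =>
      match order.getLast? with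
      | some j => bLoop buckets ls a' (j + 1) location
      | none => a'   -- order[-1] would raise IndexError; unreachable: every bucket list is nonempty

def solution_alt (priorities : List Int) (location : Int) : Int :=
  let buckets := bBuild (PySem.List.enumerate priorities)
  bLoop buckets (PySem.List.sorted buckets.keys (fun x => x) true) 0 0 location

-- ===== PRECONDITION & SPEC =====
def Spec_solution (priorities : List Int) (location : Int) (out : Int) : Prop := out = solution_alt priorities location
instance (priorities : List Int) (location : Int) (out : Int) : Decidable (Spec_solution priorities location out) := by unfold Spec_solution; infer_instance

-- ===== CLAIM (what is proved, stated in full; the proofs are below) =====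
def Claim_equal_solution : Prop := ∀ (priorities : List Int) (location : Int), Dom_solution priorities location → Spec_solution priorities location (solution priorities location)

-- ===== LEMMAS AND PROOFS =====

-- the remaining items once the levels in `ls` are the ones not yet printed
def remOf (priorities ls : List Int) : List (Int × Int) :=
  (PySem.List.enumerate priorities).filter (fun ip => decide (ip.2 ∈ ls))

-- the queue A holds when the cursor is at c: items with index ≥ c first, then the wrapped ones
def QSplit (priorities ls : List Int) (c : Int) : List (Int × Int) :=
  (remOf priorities ls).filter (fun ip => decide (c ≤ ip.1))
    ++ (remOf priorities ls).filter (fun ip => decide (ip.1 < c))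

-- the queue left after a whole priority level m has been printed
def afterL (m : Int) (q : List (Int × Int)) : List (Int × Int) :=
  ((q.reverse.takeWhile (fun x => x.2 != m)).reverse)
    ++ (((q.reverse.dropWhile (fun x => x.2 != m)).drop 1).reverse.filter (fun x => x.2 != m))

-- rotating the low-priority prefix to the back costs exactly its length
theorem rotA (m : Int) (ys : List (Int × Int)) : ∀ (qs : List (Int × Int)) (f : Nat) (ans loc : Int),
    (∀ y ∈ ys, y.2 < m) → (∃ z ∈ qs, z.2 = m) →
    solLoopA (ys.length + f) (ys ++ qs) ans loc = solLoopA f (qs ++ ys) ans loc := by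
  induction ys with
  | nil => intro qs f ans loc _ _; simp
  | cons y ys ih =>
    intro qs f ans loc hlt hz
    obtain ⟨z, hzq, hzm⟩ := hz
    have hex : existMaxPriority y.2 (ys ++ qs) = true := by
      refine List.any_eq_true.mpr ⟨z, by simp [hzq], ?_⟩
      have := hlt y (by simp)
      simp [hzm]; omega
    have hstep : (y :: ys).length + f = (ys.length + f) + 1 := by simp; omega
    rw [hstep]
    show solLoopA ((ys.length + f) + 1) ((y.1, y.2) :: (ys ++ qs)) ans loc = _
    rw [solLoopA]
    simp only [hex, if_pos]
    have : (ys ++ qs) ++ [(y.1, y.2)] = ys ++ (qs ++ [y]) := by simp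
    rw [this, ih (qs ++ [y]) f ans loc (fun a ha => hlt a (by simp [ha])) ⟨z, by simp [hzq], hzm⟩]
    congr 1
    simp

-- a maximal front element prints
theorem printA (m i : Int) (rest : List (Int × Int)) (f : Nat) (ans loc : Int)
    (h : ∀ x ∈ rest, x.2 ≤ m) :
    solLoopA (f + 1) ((i, m) :: rest) ans loc =
      if i = loc then ans + 1 else solLoopA f rest (ans + 1) loc := by
  have hex : existMaxPriority m rest = false := by
    rw [existMaxPriority, List.any_eq_false]
    intro x hx
    have := h x hx
    simp; omega
  rw [solLoopA]
  simp [hex]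

theorem afterL_split (m j : Int) (u w : List (Int × Int)) (hw : ∀ x ∈ w, x.2 ≠ m) :
    afterL m (u ++ (j, m) :: w) = w ++ u.filter (fun x => x.2 != m) := by
  have hwall : ∀ x ∈ w.reverse, ((fun x => x.2 != m) x) = true := by
    intro x hx
    simpa using hw x (by simpa using hx)
  have ht0 : List.takeWhile (fun x => x.2 != m) w.reverse = w.reverse :=
    List.takeWhile_eq_self_iff.mpr hwall
  have hd0 : List.dropWhile (fun x => x.2 != m) w.reverse = [] :=
    List.dropWhile_eq_nil_iff.mpr hwall
  have hrev : (u ++ (j, m) :: w).reverse = w.reverse ++ (j, m) :: u.reverse := by simp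
  have htk : List.takeWhile (fun x => x.2 != m) (w.reverse ++ (j, m) :: u.reverse) = w.reverse := by
    rw [List.takeWhile_append, ht0]
    simp
  have hdp : List.dropWhile (fun x => x.2 != m) (w.reverse ++ (j, m) :: u.reverse) = (j, m) :: u.reverse := by
    rw [List.dropWhile_append, hd0]
    simp
  rw [afterL, hrev, htk, hdp]
  simp

theorem exists_last_split (m : Int) (l : List (Int × Int)) (h : ∃ x ∈ l, x.2 = m) :
    ∃ u j w, l = u ++ (j, m) :: w ∧ ∀ x ∈ w, x.2 ≠ m := by
  induction l with
  | nil => simp at h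
  | cons a l ih =>
    by_cases htail : ∃ x ∈ l, x.2 = m
    · obtain ⟨u, j, w, hdec, hw⟩ := ih htail
      exact ⟨a :: u, j, w, by simp [hdec], hw⟩
    · push_neg at htail
      obtain ⟨x, hx, hxm⟩ := h
      rcases List.mem_cons.mp hx with h1 | h1
      · subst h1
        exact ⟨[], x.1, l, by simp [← hxm], htail⟩
      · exact absurd hxm (htail x h1)

theorem exists_first_split (m : Int) (l : List (Int × Int)) (h : ∃ x ∈ l, x.2 = m) :
    ∃ ys i zs, l = ys ++ (i, m) :: zs ∧ ∀ y ∈ ys, y.2 ≠ m := by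
  induction l with
  | nil => simp at h
  | cons a l ih =>
    by_cases hhead : a.2 = m
    · exact ⟨[], a.1, l, by simp [← hhead], by simp⟩
    · obtain ⟨x, hx, hxm⟩ := h
      have htail : ∃ x ∈ l, x.2 = m := by
        rcases List.mem_cons.mp hx with h1 | h1
        · exact absurd (h1 ▸ hxm) hhead
        · exact ⟨x, h1, hxm⟩
      obtain ⟨ys, i, zs, hdec, hys⟩ := ih htail
      refine ⟨a :: ys, i, zs, by simp [hdec], ?_⟩
      intro y hy
      rcases List.mem_cons.mp hy with h1 | h1
      · exact h1 ▸ hhead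
      · exact hys y h1

theorem afterL_rotate (m i : Int) (ys zs : List (Int × Int)) (hys : ∀ y ∈ ys, y.2 ≠ m)
    (hzs : ∃ x ∈ zs, x.2 = m) :
    afterL m (zs ++ ys) = afterL m (ys ++ (i, m) :: zs) := by
  obtain ⟨u, j, w, hdec, hw⟩ := exists_last_split m zs hzs
  have hysf : ys.filter (fun x => x.2 != m) = ys := by
    rw [List.filter_eq_self]
    intro x hx
    simpa using hys x hx
  have h1 : zs ++ ys = u ++ (j, m) :: (w ++ ys) := by simp [hdec]
  have h2 : ys ++ (i, m) :: zs = (ys ++ (i, m) :: u) ++ (j, m) :: w := by simp [hdec]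
  rw [h1, afterL_split m j u (w ++ ys) (by
    intro x hx
    rcases List.mem_append.mp hx with h | h
    · exact hw x h
    · exact hys x h), h2,
    afterL_split m j (ys ++ (i, m) :: u) w hw]
  simp [List.filter_append, hysf]

-- a queue without m-items is untouched by afterL
theorem afterL_of_none (m : Int) (q : List (Int × Int)) (h : ∀ x ∈ q, x.2 ≠ m) :
    afterL m q = q := by
  have hall : ∀ x ∈ q.reverse, ((fun x => x.2 != m) x) = true := by
    intro x hx
    simpa using h x (by simpa using hx)
  rw [afterL, List.takeWhile_eq_self_iff.mpr hall, List.dropWhile_eq_nil_iff.mpr hall]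
  simp

-- one whole priority level: the m-items print in queue order, everything else rotates behind
theorem levelAux (m : Int) : ∀ (pc : Nat) (queue : List (Int × Int)) (ans loc : Int),
    (queue.filter (fun x => x.2 == m)).length = pc →
    (∀ x ∈ queue, x.2 ≤ m) →
    ∃ s ≤ queue.length * pc, ∀ g,
      solLoopA (s + g) queue ans loc =
        match bScan ((queue.filter (fun x => x.2 == m)).map Prod.fst) ans loc with
        | .error r => r
        | .ok a' => solLoopA g (afterL m queue) a' loc := by
  intro pc
  induction pc with
  | zero =>
    intro queue ans loc hlen _
    have hf : queue.filter (fun x => x.2 == m) = [] := List.length_eq_zero_iff.mp hlen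
    have hnone : ∀ x ∈ queue, x.2 ≠ m := by
      intro x hx hxm
      have : x ∈ queue.filter (fun x => x.2 == m) := List.mem_filter.mpr ⟨hx, by simp [hxm]⟩
      simp [hf] at this
    refine ⟨0, by simp, ?_⟩
    intro g
    rw [hf, afterL_of_none m queue hnone]
    simp only [List.map_nil, bScan, Nat.zero_add]
  | succ pc ih =>
    intro queue ans loc hlen hle
    have hex : ∃ x ∈ queue, x.2 = m := by
      rcases hq : queue.filter (fun x => x.2 == m) with _ | ⟨x, t⟩
      · simp [hq] at hlen
      · have hx : x ∈ queue.filter (fun x => x.2 == m) := by rw [hq]; simp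
        have := List.mem_filter.mp hx
        exact ⟨x, this.1, by simpa using this.2⟩
    obtain ⟨ys, i, zs, hdec, hys⟩ := exists_first_split m queue hex
    have hysf : ys.filter (fun x => x.2 == m) = [] := by
      rw [List.filter_eq_nil_iff]
      intro x hx
      simpa using hys x hx
    have hfq : queue.filter (fun x => x.2 == m) = (i, m) :: zs.filter (fun x => x.2 == m) := by
      rw [hdec, List.filter_append, hysf]
      simp
    have hzlen : (zs.filter (fun x => x.2 == m)).length = pc := by
      rw [hfq] at hlen
      simpa using hlen
    have hq2 : ((zs ++ ys).filter (fun x => x.2 == m)) = zs.filter (fun x => x.2 == m) := by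
      rw [List.filter_append, hysf]
      simp
    have hle2 : ∀ x ∈ zs ++ ys, x.2 ≤ m := by
      intro x hx
      apply hle
      rw [hdec]
      rcases List.mem_append.mp hx with h | h
      · simp [h]
      · simp [h]
    obtain ⟨s₂, hs₂, heq₂⟩ := ih (zs ++ ys) (ans + 1) loc (by rw [hq2, hzlen]) hle2
    have hAfter : afterL m (zs ++ ys) = afterL m queue := by
      by_cases hzs : ∃ x ∈ zs, x.2 = m
      · rw [hdec]; exact afterL_rotate m i ys zs (fun y hy => by simpa using hys y hy) hzs
      · push_neg at hzs
        rw [afterL_of_none m (zs ++ ys) (by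
          intro x hx
          rcases List.mem_append.mp hx with h | h
          · exact hzs x h
          · exact hys x h), hdec, afterL_split m i ys zs hzs]
        congr 1
        symm
        rw [List.filter_eq_self]
        intro x hx
        simpa using hys x hx
    have hlt : ∀ y ∈ ys, y.2 < m := by
      intro y hy
      have h1 := hle y (by rw [hdec]; simp [hy])
      have h2 := hys y hy
      omega
    refine ⟨ys.length + 1 + s₂, ?_, ?_⟩
    · have hql : queue.length = ys.length + 1 + zs.length := by rw [hdec]; simp; omega
      have h1 : (zs ++ ys).length * pc ≤ queue.length * pc := by
        apply Nat.mul_le_mul_right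
        rw [hql]; simp; omega
      have h2 : s₂ ≤ queue.length * pc := le_trans hs₂ h1
      have h3 : queue.length * (pc + 1) = queue.length * pc + queue.length := by ring
      omega
    · intro g
      have harr : ys.length + 1 + s₂ + g = ys.length + (s₂ + g + 1) := by omega
      rw [harr, hdec, rotA m ys ((i, m) :: zs) (s₂ + g + 1) ans loc hlt ⟨(i, m), by simp, rfl⟩]
      have hsh : ((i, m) :: zs) ++ ys = (i, m) :: (zs ++ ys) := by simp
      rw [hsh, printA m i (zs ++ ys) (s₂ + g) ans loc hle2]
      rw [← hdec, hfq]
      by_cases hil : i = loc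
      · simp [bScan, hil]
      · simp only [bScan, if_neg hil, List.map_cons]
        rw [heq₂ g, hq2, hAfter]

-- the dict built by the setdefault/append loop, characterised
theorem bBuild_getD (pairs : List (Int × Int)) (p : Int) :
    (bBuild pairs).getD p [] = (pairs.filter (fun ip => ip.2 == p)).map Prod.fst := by
  have hfold : bBuild pairs
      = ((pairs.map (fun ip => (ip.2, ip.1))).foldl
          (fun d q => d.modify q.1 [] (fun v => v ++ [q.2])) PySem.Dict.empty) := by
    rw [List.foldl_map]
    rfl
  rw [hfold, PySem.Dict.getD_foldl_modify_append]
  simp [List.filter_map, Function.comp_def, List.map_map]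

theorem bBuild_keys (pairs : List (Int × Int)) :
    (bBuild pairs).keys = PySem.Set.ofList (pairs.map Prod.snd) := by
  rw [bBuild, PySem.Dict.keys_foldl_modify_key pairs (fun ip => ip.2) [] (fun _ x => (fun v => v ++ [x.1]))]
  simp [PySem.Set.update, PySem.Set.ofList, PySem.Dict.keys_empty]

-- bSkip on a sorted list splits it at the cursor
theorem bSkip_take_drop (c : Int) (idxs : List Int) (h : idxs.Pairwise (· < ·)) :
    idxs.take (bSkip idxs c) = idxs.filter (fun x => decide (x < c)) ∧
    idxs.drop (bSkip idxs c) = idxs.filter (fun x => decide (c ≤ x)) := by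
  induction idxs with
  | nil => simp [bSkip]
  | cons x xs ih =>
    have hpw := (List.pairwise_cons.mp h).1
    have htail := (List.pairwise_cons.mp h).2
    by_cases hx : x < c
    · have := ih htail
      rw [bSkip]
      simp only [if_pos hx]
      constructor
      · simp [List.take_succ_cons, this.1, hx]
      · simp [List.drop_succ_cons, this.2, hx]
    · rw [bSkip]
      simp only [if_neg hx]
      constructor
      · have h1 : xs.filter (fun y => decide (y < c)) = [] := by
          rw [List.filter_eq_nil_iff]
          intro y hy
          have := hpw y hy
          simp; omega
        simp [h1, hx]
      · have h2 : xs.filter (fun y => decide (c ≤ y)) = xs := by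
          rw [List.filter_eq_self]
          intro y hy
          have := hpw y hy
          simp; omega
        simp [h2, not_lt.mp hx]

-- a fst-sorted list is its below-c part followed by its above-c part
theorem sorted_split_at (c : Int) (l : List (Int × Int)) (h : (l.map Prod.fst).Pairwise (· < ·)) :
    l = l.filter (fun x => decide (x.1 < c)) ++ l.filter (fun x => decide (c ≤ x.1)) := by
  induction l with
  | nil => simp
  | cons x xs ih =>
    simp only [List.map_cons, List.pairwise_cons] at h
    by_cases hx : x.1 < c
    · have := ih h.2
      simp only [List.filter_cons, decide_eq_true_eq]
      rw [if_pos hx, if_neg (by omega)]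
      simpa using this
    · have h1 : xs.filter (fun y => decide (y.1 < c)) = [] := by
        rw [List.filter_eq_nil_iff]
        intro y hy
        have := h.1 y.1 (List.mem_map.mpr ⟨y, hy, rfl⟩)
        simp; omega
      have h2 : xs.filter (fun y => decide (c ≤ y.1)) = xs := by
        rw [List.filter_eq_self]
        intro y hy
        have := h.1 y.1 (List.mem_map.mpr ⟨y, hy, rfl⟩)
        simp; omega
      simp only [List.filter_cons, h1, h2]
      simp [hx, not_lt.mp hx]

-- map fst commutes with a filter that only looks at fst
theorem map_fst_filter (P : Int → Bool) (l : List (Int × Int)) :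
    (l.filter (fun ip => P ip.1)).map Prod.fst = (l.map Prod.fst).filter P := by
  induction l with
  | nil => rfl
  | cons x xs ih =>
    by_cases hx : P x.1
    · simp [hx, ih]
    · simp [hx, ih]

-- after printing level m, the queue is again a cursor split, at one past the last printed index
theorem afterQSplit (priorities : List Int) (m : Int) (ls' : List Int) (c j : Int)
    (hm : m ∉ ls')
    (hj : (((QSplit priorities (m :: ls') c).filter (fun x => x.2 == m)).map Prod.fst).getLast? = some j) :
    afterL m (QSplit priorities (m :: ls') c) = QSplit priorities ls' (j + 1) := by
  have hpw_rem : (remOf priorities (m :: ls')).Pairwise (fun a b => a.1 < b.1) :=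
    (PySem.List.pairwise_lt_enumerate priorities 0).filter _
  set rem := remOf priorities (m :: ls') with hremdef
  set hi := rem.filter (fun ip => decide (c ≤ ip.1)) with hhidef
  set lo := rem.filter (fun ip => decide (ip.1 < c)) with hlodef
  have hQ : QSplit priorities (m :: ls') c = hi ++ lo := rfl
  have hpw_hi : hi.Pairwise (fun a b => a.1 < b.1) := hpw_rem.filter _
  have hpw_lo : lo.Pairwise (fun a b => a.1 < b.1) := hpw_rem.filter _
  have hsplit : rem = lo ++ hi := by
    have := sorted_split_at c rem (List.pairwise_map.mpr hpw_rem)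
    simpa using this
  have hrem' : remOf priorities ls' = rem.filter (fun x => x.2 != m) := by
    rw [hremdef, remOf, remOf, List.filter_filter]
    apply List.filter_congr
    intro x _
    by_cases hxm : x.2 = m
    · simp [hxm, hm]
    · simp [hxm, List.mem_cons]
  have hc_hi : ∀ x ∈ hi, c ≤ x.1 := by
    intro x hx
    have := (List.mem_filter.mp hx).2
    simpa using this
  have hc_lo : ∀ x ∈ lo, x.1 < c := by
    intro x hx
    have := (List.mem_filter.mp hx).2
    simpa using this
  have hQf : (QSplit priorities (m :: ls') c).filter (fun x => x.2 == m)
      = hi.filter (fun x => x.2 == m) ++ lo.filter (fun x => x.2 == m) := by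
    rw [hQ, List.filter_append]
  by_cases hlo0 : lo.filter (fun x => x.2 == m) = []
  · -- no wrap: the last printed index lies in hi
    have hlo_ne : ∀ x ∈ lo, x.2 ≠ m := by
      intro x hx hxm
      have : x ∈ lo.filter (fun x => x.2 == m) := List.mem_filter.mpr ⟨hx, by simp [hxm]⟩
      simp [hlo0] at this
    have hhi0 : hi.filter (fun x => x.2 == m) ≠ [] := by
      intro h0
      rw [hQf, h0, hlo0] at hj
      simp at hj
    have hex : ∃ x ∈ hi, x.2 = m := by
      rcases hf : hi.filter (fun x => x.2 == m) with _ | ⟨x, t⟩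
      · exact absurd hf hhi0
      · have hx : x ∈ hi.filter (fun x => x.2 == m) := by rw [hf]; simp
        have := List.mem_filter.mp hx
        exact ⟨x, this.1, by simpa using this.2⟩
    obtain ⟨u, j0, w, hdec, hwne⟩ := exists_last_split m hi hex
    have hwf : w.filter (fun x => x.2 == m) = [] := by
      rw [List.filter_eq_nil_iff]; intro x hx; simpa using hwne x hx
    have hif : hi.filter (fun x => x.2 == m) = u.filter (fun x => x.2 == m) ++ [(j0, m)] := by
      rw [hdec, List.filter_append, List.filter_cons, hwf]
      simp
    have hjj : j = j0 := by
      rw [hQf, hif, hlo0, List.append_nil, List.map_append] at hj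
      rw [List.map_cons, List.map_nil] at hj
      rw [show (List.map Prod.fst (u.filter (fun x => x.2 == m)) ++ [j0]).getLast? = some j0 from
        List.getLast?_concat] at hj
      exact (Option.some_inj.mp hj).symm
    subst hjj
    have hu_lt : ∀ x ∈ u, x.1 < j := by
      intro x hx
      have := List.pairwise_append.mp (hdec ▸ hpw_hi)
      exact this.2.2 x hx (j, m) (by simp)
    have hw_gt : ∀ x ∈ w, j < x.1 := by
      have := List.pairwise_append.mp (hdec ▸ hpw_hi)
      have hcons := this.2.1
      intro x hx
      exact (List.pairwise_cons.mp hcons).1 x hx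
    have hcj : c ≤ j := hc_hi (j, m) (by rw [hdec]; simp)
    have hwne' : ∀ x ∈ w ++ lo, x.2 ≠ m := by
      intro x hx
      rcases List.mem_append.mp hx with h | h
      · exact hwne x h
      · exact hlo_ne x h
    have hafter : afterL m (QSplit priorities (m :: ls') c) = (w ++ lo) ++ u.filter (fun x => x.2 != m) := by
      rw [hQ, hdec, show (u ++ (j, m) :: w) ++ lo = u ++ (j, m) :: (w ++ lo) by simp]
      exact afterL_split m j u (w ++ lo) hwne'
    have hlof : lo.filter (fun x => x.2 != m) = lo := by
      rw [List.filter_eq_self]; intro x hx; simpa using hlo_ne x hx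
    have hwf' : w.filter (fun x => x.2 != m) = w := by
      rw [List.filter_eq_self]; intro x hx; simpa using hwne x hx
    have hrem'2 : remOf priorities ls' = lo ++ (u.filter (fun x => x.2 != m) ++ w) := by
      rw [hrem', hsplit, List.filter_append, hlof, hdec, List.filter_append, List.filter_cons]
      simp [hwf']
    rw [hafter, QSplit, hrem'2]
    have hnil1 : lo.filter (fun ip => decide (j + 1 ≤ ip.1)) = [] := by
      rw [List.filter_eq_nil_iff]; intro x hx
      have := hc_lo x hx; simp; omega
    have hnil2 : (u.filter (fun x => x.2 != m)).filter (fun ip => decide (j + 1 ≤ ip.1)) = [] := by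
      rw [List.filter_eq_nil_iff]; intro x hx
      have := hu_lt x (List.mem_of_mem_filter hx); simp; omega
    have hself3 : w.filter (fun ip => decide (j + 1 ≤ ip.1)) = w := by
      rw [List.filter_eq_self]; intro x hx
      have := hw_gt x hx; simp; omega
    have hself1 : lo.filter (fun ip => decide (ip.1 < j + 1)) = lo := by
      rw [List.filter_eq_self]; intro x hx
      have := hc_lo x hx; simp; omega
    have hself2 : (u.filter (fun x => x.2 != m)).filter (fun ip => decide (ip.1 < j + 1)) = u.filter (fun x => x.2 != m) := by
      rw [List.filter_eq_self]; intro x hx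
      have := hu_lt x (List.mem_of_mem_filter hx); simp; omega
    have hnil3 : w.filter (fun ip => decide (ip.1 < j + 1)) = [] := by
      rw [List.filter_eq_nil_iff]; intro x hx
      have := hw_gt x hx; simp; omega
    simp only [List.filter_append]
    rw [hnil1, hnil2, hself3, hself1, hself2, hnil3]
    simp
  · -- wrap: the last printed index lies in lo
    have hex : ∃ x ∈ lo, x.2 = m := by
      rcases hf : lo.filter (fun x => x.2 == m) with _ | ⟨x, t⟩
      · exact absurd hf hlo0
      · have hx : x ∈ lo.filter (fun x => x.2 == m) := by rw [hf]; simp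
        have := List.mem_filter.mp hx
        exact ⟨x, this.1, by simpa using this.2⟩
    obtain ⟨u, j0, w, hdec, hwne⟩ := exists_last_split m lo hex
    have hwf : w.filter (fun x => x.2 == m) = [] := by
      rw [List.filter_eq_nil_iff]; intro x hx; simpa using hwne x hx
    have hlof2 : lo.filter (fun x => x.2 == m) = u.filter (fun x => x.2 == m) ++ [(j0, m)] := by
      rw [hdec, List.filter_append, List.filter_cons, hwf]
      simp
    have hjj : j = j0 := by
      rw [hQf, hlof2, List.map_append, List.map_append, List.map_cons, List.map_nil,
        ← List.append_assoc] at hj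
      rw [show ((List.map Prod.fst (hi.filter (fun x => x.2 == m)) ++ List.map Prod.fst (u.filter (fun x => x.2 == m))) ++ [j0]).getLast? = some j0 from List.getLast?_concat] at hj
      exact (Option.some_inj.mp hj).symm
    subst hjj
    have hu_lt : ∀ x ∈ u, x.1 < j := by
      intro x hx
      have := List.pairwise_append.mp (hdec ▸ hpw_lo)
      exact this.2.2 x hx (j, m) (by simp)
    have hw_gt : ∀ x ∈ w, j < x.1 := by
      have := List.pairwise_append.mp (hdec ▸ hpw_lo)
      have hcons := this.2.1
      intro x hx
      exact (List.pairwise_cons.mp hcons).1 x hx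
    have hjc : j < c := hc_lo (j, m) (by rw [hdec]; simp)
    have hafter : afterL m (QSplit priorities (m :: ls') c)
        = w ++ (hi ++ u).filter (fun x => x.2 != m) := by
      rw [hQ, hdec, show hi ++ (u ++ (j, m) :: w) = (hi ++ u) ++ (j, m) :: w by simp]
      exact afterL_split m j (hi ++ u) w hwne
    have hwf' : w.filter (fun x => x.2 != m) = w := by
      rw [List.filter_eq_self]; intro x hx; simpa using hwne x hx
    have hrem'2 : remOf priorities ls'
        = (u.filter (fun x => x.2 != m) ++ w) ++ hi.filter (fun x => x.2 != m) := by
      rw [hrem', hsplit, List.filter_append, hdec, List.filter_append, List.filter_cons]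
      simp [hwf']
    rw [hafter, QSplit, hrem'2]
    have hnil1 : (u.filter (fun x => x.2 != m)).filter (fun ip => decide (j + 1 ≤ ip.1)) = [] := by
      rw [List.filter_eq_nil_iff]; intro x hx
      have := hu_lt x (List.mem_of_mem_filter hx); simp; omega
    have hself2 : w.filter (fun ip => decide (j + 1 ≤ ip.1)) = w := by
      rw [List.filter_eq_self]; intro x hx
      have := hw_gt x hx; simp; omega
    have hself3 : (hi.filter (fun x => x.2 != m)).filter (fun ip => decide (j + 1 ≤ ip.1)) = hi.filter (fun x => x.2 != m) := by
      rw [List.filter_eq_self]; intro x hx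
      have := hc_hi x (List.mem_of_mem_filter hx); simp; omega
    have hself1 : (u.filter (fun x => x.2 != m)).filter (fun ip => decide (ip.1 < j + 1)) = u.filter (fun x => x.2 != m) := by
      rw [List.filter_eq_self]; intro x hx
      have := hu_lt x (List.mem_of_mem_filter hx); simp; omega
    have hnil2 : w.filter (fun ip => decide (ip.1 < j + 1)) = [] := by
      rw [List.filter_eq_nil_iff]; intro x hx
      have := hw_gt x hx; simp; omega
    have hnil3 : (hi.filter (fun x => x.2 != m)).filter (fun ip => decide (ip.1 < j + 1)) = [] := by
      rw [List.filter_eq_nil_iff]; intro x hx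
      have := hc_hi x (List.mem_of_mem_filter hx); simp; omega
    simp only [List.filter_append]
    rw [hnil1, hself2, hself3, hself1, hnil2, hnil3]
    simp

-- removing the processed level from the level list removes exactly its items
theorem remOf_cons (priorities : List Int) (m : Int) (ls' : List Int) (hm : m ∉ ls') :
    remOf priorities ls' = (remOf priorities (m :: ls')).filter (fun x => x.2 != m) := by
  rw [remOf, remOf, List.filter_filter]
  apply List.filter_congr
  intro x _
  by_cases hxm : x.2 = m
  · simp [hxm, hm]
  · simp [hxm, List.mem_cons]

-- a cursor split is a permutation of the remaining items
theorem QSplit_perm (priorities ls : List Int) (c : Int) :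
    (QSplit priorities ls c).Perm (remOf priorities ls) := by
  have h := sorted_split_at c (remOf priorities ls)
    (List.pairwise_map.mpr ((PySem.List.pairwise_lt_enumerate priorities 0).filter _))
  rw [QSplit]
  conv_rhs => rw [h]
  exact List.perm_append_comm

-- the main induction over the decreasing list of distinct priorities
theorem mainLemma : ∀ (ls priorities : List Int) (c ans loc : Int) (f : Nat),
    ls.Pairwise (· > ·) →
    (∀ p ∈ ls, p ∈ priorities) →
    f ≥ (QSplit priorities ls c).length * (QSplit priorities ls c).length
          + (QSplit priorities ls c).length + 1 →
    solLoopA f (QSplit priorities ls c) ans loc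
      = bLoop (bBuild (PySem.List.enumerate priorities)) ls ans c loc := by
  intro ls
  induction ls with
  | nil =>
    intro priorities c ans loc f _ _ hf
    have hQ : QSplit priorities [] c = [] := by simp [QSplit, remOf]
    rw [hQ] at hf ⊢
    rcases f with _ | f
    · simp at hf
    · rfl
  | cons m ls' ih =>
    intro priorities c ans loc f hpw hmem hf
    have hpc := List.pairwise_cons.mp hpw
    have hmnot : m ∉ ls' := fun hmem' => absurd (hpc.1 m hmem') (lt_irrefl m)
    set E := PySem.List.enumerate priorities with hEdef
    set Q := QSplit priorities (m :: ls') c with hQdef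
    have hQle : ∀ x ∈ Q, x.2 ≤ m := by
      intro x hx
      have hxrem : x ∈ remOf priorities (m :: ls') := by
        rw [hQdef, QSplit] at hx
        rcases List.mem_append.mp hx with h | h
        · exact List.mem_of_mem_filter h
        · exact List.mem_of_mem_filter h
      have := (List.mem_filter.mp hxrem).2
      simp only [decide_eq_true_eq, List.mem_cons] at this
      rcases this with h | h
      · omega
      · have := hpc.1 x.2 h; omega
    obtain ⟨s, hs, heq⟩ := levelAux m ((Q.filter (fun x => x.2 == m)).length) Q ans loc rfl hQle
    -- the bucket list of level m, and the printed order
    have hidxs : (bBuild E).getD m [] = (E.filter (fun ip => ip.2 == m)).map Prod.fst :=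
      bBuild_getD E m
    have hιpw : ((E.filter (fun ip => ip.2 == m)).map Prod.fst).Pairwise (· < ·) :=
      List.pairwise_map.mpr ((PySem.List.pairwise_lt_enumerate priorities 0).filter _)
    obtain ⟨htake, hdrop⟩ := bSkip_take_drop c _ hιpw
    -- printed items in queue order = the bucket rotated at the cursor
    have hremm : (remOf priorities (m :: ls')).filter (fun x => x.2 == m)
        = E.filter (fun ip => ip.2 == m) := by
      rw [remOf, List.filter_filter]
      apply List.filter_congr
      intro x _
      by_cases hxm : x.2 = m
      · simp [hxm]
      · simp [hxm]
    have hcomm1 : (Q.filter (fun x => x.2 == m)).map Prod.fst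
        = ((E.filter (fun ip => ip.2 == m)).map Prod.fst).filter (fun v => decide (c ≤ v))
          ++ ((E.filter (fun ip => ip.2 == m)).map Prod.fst).filter (fun v => decide (v < c)) := by
      rw [hQdef, QSplit, List.filter_append, List.map_append]
      rw [List.filter_filter, List.filter_filter]
      rw [List.filter_congr (l := remOf priorities (m :: ls'))
            (q := fun x => (decide (c ≤ x.1) && (x.2 == m))) (fun x _ => Bool.and_comm _ _),
          List.filter_congr (l := remOf priorities (m :: ls'))
            (q := fun x => (decide (x.1 < c) && (x.2 == m))) (fun x _ => Bool.and_comm _ _)]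
      rw [← List.filter_filter, ← List.filter_filter, hremm]
      rw [map_fst_filter (fun v => decide (c ≤ v)), map_fst_filter (fun v => decide (v < c))]
    have horder : (Q.filter (fun x => x.2 == m)).map Prod.fst
        = ((bBuild E).getD m []).drop (bSkip ((bBuild E).getD m []) c)
          ++ ((bBuild E).getD m []).take (bSkip ((bBuild E).getD m []) c) := by
      rw [hidxs, hdrop, htake, hcomm1]
    -- that order is nonempty because m really occurs
    have hmE : ∃ x ∈ E, x.2 = m := by
      have hmp : m ∈ priorities := hmem m (by simp)
      have : m ∈ E.map (fun x => x.2) := by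
        rw [hEdef, PySem.List.map_snd_enumerate]; exact hmp
      obtain ⟨x, hx, hx2⟩ := List.mem_map.mp this
      exact ⟨x, hx, hx2⟩
    have hord_ne : (Q.filter (fun x => x.2 == m)).map Prod.fst ≠ [] := by
      obtain ⟨x, hxE, hxm⟩ := hmE
      have hxι : x.1 ∈ (E.filter (fun ip => ip.2 == m)).map Prod.fst :=
        List.mem_map.mpr ⟨x, List.mem_filter.mpr ⟨hxE, by simp [hxm]⟩, rfl⟩
      rw [hcomm1]
      intro h0
      rcases List.append_eq_nil_iff.mp h0 with ⟨h1, h2⟩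
      by_cases hxc : c ≤ x.1
      · have : x.1 ∈ ((E.filter (fun ip => ip.2 == m)).map Prod.fst).filter (fun v => decide (c ≤ v)) :=
          List.mem_filter.mpr ⟨hxι, by simpa using hxc⟩
        simp [h1] at this
      · have : x.1 ∈ ((E.filter (fun ip => ip.2 == m)).map Prod.fst).filter (fun v => decide (v < c)) :=
          List.mem_filter.mpr ⟨hxι, by simp; omega⟩
        simp [h2] at this
    obtain ⟨j, hj⟩ : ∃ j, ((Q.filter (fun x => x.2 == m)).map Prod.fst).getLast? = some j := by
      rcases h : ((Q.filter (fun x => x.2 == m)).map Prod.fst).getLast? with _ | j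
      · exact absurd (List.getLast?_eq_none_iff.mp h) hord_ne
      · exact ⟨j, h⟩
    -- lengths and fuel
    have hpcle : (Q.filter (fun x => x.2 == m)).length ≤ Q.length := List.length_filter_le _ _
    have hsf : s ≤ f := by
      have h1 : Q.length * (Q.filter (fun x => x.2 == m)).length ≤ Q.length * Q.length :=
        Nat.mul_le_mul_left _ hpcle
      omega
    -- run the level on the A side
    have hA := heq (f - s)
    rw [Nat.add_sub_cancel' hsf] at hA
    -- unfold one step of bLoop on the B side
    have hB : bLoop (bBuild E) (m :: ls') ans c loc
        = match bScan ((Q.filter (fun x => x.2 == m)).map Prod.fst) ans loc with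
          | .error r => r
          | .ok a' =>
            match ((Q.filter (fun x => x.2 == m)).map Prod.fst).getLast? with
            | some j => bLoop (bBuild E) ls' a' (j + 1) loc
            | none => a' := by
      rw [horder]
      rfl
    rw [hA, hB]
    rcases hscan : bScan ((Q.filter (fun x => x.2 == m)).map Prod.fst) ans loc with r | a'
    · simp only [hscan]
    · simp only [hscan, hj]
      have hafter : afterL m Q = QSplit priorities ls' (j + 1) :=
        afterQSplit priorities m ls' c j hmnot hj
      rw [hafter]
      apply ih priorities (j + 1) a' loc (f - s) hpc.2 (fun p hp => hmem p (by simp [hp]))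
      -- fuel accounting
      have hlenQ : Q.length = (remOf priorities (m :: ls')).length :=
        (QSplit_perm priorities (m :: ls') c).length_eq
      have hlenQ' : (QSplit priorities ls' (j + 1)).length = (remOf priorities ls').length :=
        (QSplit_perm priorities ls' (j + 1)).length_eq
      have hpceq : (Q.filter (fun x => x.2 == m)).length
          = ((remOf priorities (m :: ls')).filter (fun x => x.2 == m)).length :=
        ((QSplit_perm priorities (m :: ls') c).filter _).length_eq
      have hlrem : (remOf priorities (m :: ls')).length
          = ((remOf priorities (m :: ls')).filter (fun x => x.2 == m)).length
            + (remOf priorities ls').length := by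
        rw [remOf_cons priorities m ls' hmnot]
        exact List.length_eq_length_filter_add _
      set L := Q.length with hL
      set pc := (Q.filter (fun x => x.2 == m)).length with hpcdef
      have hlen' : (QSplit priorities ls' (j + 1)).length = L - pc := by omega
      rw [hlen']
      have hpos : pc ≤ L := hpcle
      have harith : (L - pc) * (L - pc) + (L - pc) + 1 + L * pc ≤ L * L + L + 1 := by
        obtain ⟨a, ha⟩ : ∃ a, L = a + pc := ⟨L - pc, by omega⟩
        rw [ha]
        have h2 : a + pc - pc = a := by omega
        rw [h2]
        nlinarith
      omega

theorem solution_spec : Claim_equal_solution := by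
  intro priorities location _
  simp only [Spec_solution, solution, solution_alt]
  set E := PySem.List.enumerate priorities with hEdef
  have hkeys : (bBuild E).keys = PySem.Set.ofList priorities := by
    rw [bBuild_keys]
    congr 1
    exact PySem.List.map_snd_enumerate priorities 0
  set ls₀ := PySem.List.sorted (bBuild E).keys (fun x => x) true with hlsdef
  have hperm : ls₀.Perm (bBuild E).keys := PySem.List.sorted_perm _ _ _
  have hmemls : ∀ p, p ∈ ls₀ ↔ p ∈ priorities := by
    intro p
    rw [hperm.mem_iff, hkeys, PySem.Set.mem_ofList]
  have hnodup : ls₀.Nodup := by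
    rw [hperm.nodup_iff, hkeys]
    exact PySem.Set.nodup_ofList priorities
  have hge : ls₀.Pairwise (fun a b => b ≤ a) := PySem.List.sorted_pairwise_rev _ _
  have hgt : ls₀.Pairwise (· > ·) := by
    have hand := hge.and hnodup
    exact hand.imp (fun h => by
      obtain ⟨h1, h2⟩ := h
      omega)
  have hrem : remOf priorities ls₀ = E := by
    rw [remOf, List.filter_eq_self]
    intro x hx
    have : x.2 ∈ E.map (fun y => y.2) := List.mem_map.mpr ⟨x, hx, rfl⟩
    rw [hEdef, PySem.List.map_snd_enumerate] at this
    simpa using (hmemls x.2).mpr this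
  have hE0 : ∀ x ∈ E, (0 : Int) ≤ x.1 := by
    intro x hx
    obtain ⟨k, hk, hxe⟩ := (PySem.List.mem_enumerate_iff priorities 0 x).mp hx
    rw [hxe]
    omega
  have hQ0 : QSplit priorities ls₀ 0 = E := by
    rw [QSplit, hrem]
    have h1 : E.filter (fun ip => decide ((0 : Int) ≤ ip.1)) = E := by
      rw [List.filter_eq_self]
      intro x hx
      simpa using hE0 x hx
    have h2 : E.filter (fun ip => decide (ip.1 < (0 : Int))) = [] := by
      rw [List.filter_eq_nil_iff]
      intro x hx
      have := hE0 x hx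
      simp
      omega
    rw [h1, h2, List.append_nil]
  have hlen : E.length = priorities.length := PySem.List.length_enumerate priorities 0
  have := mainLemma ls₀ priorities 0 0 location
    (priorities.length * priorities.length + priorities.length + 1)
    hgt (fun p hp => (hmemls p).mp hp)
    (by rw [hQ0, hlen])
  rw [hQ0, ← hEdef] at this
  rw [this]
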